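-- pv_equiv track=rewrite | github.com/okihara/youtube-sync-reader | translator.py | _adjust_translated_parts
-- ===== SOURCE A (Python) =====
-- from typing import List, Dict, Optional, Tuple
--
-- def _adjust_translated_parts(translated_parts: List[str], chunk_size: int) -> List[str]:
--     """
--     翻訳結果を元のチャンクサイズに調整する
--     Args:
--         translated_parts: 調整する翻訳パーツ
--         chunk_size: 目標のチャンクサイズ
--     Returns:
--         調整された翻訳パーツ
--     """
--     if len(translated_parts) > chunk_size:
--         parts_per_chunk = len(translated_parts) / chunk_size
--         adjusted_parts = []
--         current_parts = []
--
--         for i, part in enumerate(translated_parts):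
--             current_parts.append(part)
--             if (i + 1) / parts_per_chunk >= len(adjusted_parts) + 1:
--                 adjusted_parts.append(''.join(current_parts))
--                 current_parts = []
--
--         if current_parts:
--             adjusted_parts.append(''.join(current_parts))
--
--         return adjusted_parts[:chunk_size]
--     elif len(translated_parts) < chunk_size:
--         return translated_parts + [''] * (chunk_size - len(translated_parts))
--     return translated_parts
-- ===== SOURCE B (Python) =====
-- from typing import List
--
-- def _adjust_translated_parts(translated_parts: List[str], chunk_size: int) -> List[str]:
--     n = len(translated_parts)
--     if n > chunk_size:
--         parts_per_chunk = n / chunk_size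
--         # first compute the cut positions: for each target chunk j, scan forward to
--         # the first index i with (i+1)/parts_per_chunk >= j+1
--         cuts = []
--         i = 0
--         for j in range(chunk_size):
--             while i < n and not ((i + 1) / parts_per_chunk >= j + 1):
--                 i += 1
--             if i >= n:
--                 break
--             cuts.append(i + 1)
--             i += 1
--         # then materialise the chunks by slicing between consecutive cuts
--         out = []
--         prev = 0
--         for c in cuts:
--             out.append(''.join(translated_parts[prev:c]))
--             prev = c
--         if prev < n:
--             out.append(''.join(translated_parts[prev:]))
--         return out[:chunk_size]
--     elif n < chunk_size:
--         return translated_parts + [''] * (chunk_size - n)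
--     return translated_parts
-- ===== Notes on version B (the rewrite author's own statement) =====
-- stated objective: alternative
-- what changed: B first computes the list of cut indices (one forward scan per target chunk via the same float threshold test) and then builds each output chunk by joining a slice between consecutive cuts, instead of A's single accumulate-and-flush pass over the parts.
import Mathlib
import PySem

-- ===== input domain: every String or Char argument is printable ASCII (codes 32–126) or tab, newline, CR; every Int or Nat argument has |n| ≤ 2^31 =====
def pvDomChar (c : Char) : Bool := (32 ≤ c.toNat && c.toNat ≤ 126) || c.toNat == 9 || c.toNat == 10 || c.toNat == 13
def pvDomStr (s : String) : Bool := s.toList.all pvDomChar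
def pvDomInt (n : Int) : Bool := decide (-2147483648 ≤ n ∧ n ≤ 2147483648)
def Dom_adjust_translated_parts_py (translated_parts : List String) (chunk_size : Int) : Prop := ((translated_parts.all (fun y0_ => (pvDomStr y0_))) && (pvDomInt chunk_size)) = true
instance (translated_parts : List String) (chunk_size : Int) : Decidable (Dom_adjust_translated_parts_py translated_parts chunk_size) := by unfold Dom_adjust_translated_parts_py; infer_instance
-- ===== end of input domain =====

-- B regroups the parts by first computing the list of cut indices (one forward scan per
-- target chunk) and then joining slices between consecutive cuts, instead of A's single
-- accumulate-and-flush pass; same cost, different decomposition (objective: alternative).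

-- ----- exact model of CPython float ('/' on ints is correctly rounded IEEE-754 binary64;
-- a finite double is represented exactly as m * 2^e, m = 0 or 2^52 ≤ |m| < 2^53; no
-- overflow/underflow is reachable from |int| ≤ 2^31 inputs). Shared by both ports. -----

-- floor division of A by B at scale 2^e: (quotient, remainder, denominator)
def pvFdivAt (A B : Nat) (e : Int) : Nat × Nat × Nat :=
  if 0 ≤ e then (A / (B * 2 ^ e.toNat), A % (B * 2 ^ e.toNat), B * 2 ^ e.toNat)
  else ((A * 2 ^ (-e).toNat) / B, (A * 2 ^ (-e).toNat) % B, B)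

-- correctly rounded (round-to-nearest-even) A/B as (significand, exponent), A B > 0
def pvFdivNat (A B : Nat) : Nat × Int :=
  let e0 : Int := (Nat.log2 A : Int) - (Nat.log2 B : Int) - 53
  let r0 := pvFdivAt A B e0
  let e1 : Int := if 2 ^ 53 ≤ r0.1 then e0 + 1 else e0
  let r1 := if 2 ^ 53 ≤ r0.1 then pvFdivAt A B (e0 + 1) else r0
  let q2 : Nat := if r1.2.2 < 2 * r1.2.1 ∨ (2 * r1.2.1 = r1.2.2 ∧ r1.1 % 2 = 1) then r1.1 + 1 else r1.1
  if q2 = 2 ^ 53 then (2 ^ 52, e1 + 1) else (q2, e1)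

-- Python a / b on ints (as a double, exact dyadic representation)
def pvFdiv (a b : Int) : Int × Int :=
  if a = 0 then (0, 0)
  else
    let s : Int := if (decide (a < 0)) ≠ (decide (b < 0)) then -1 else 1
    let r := pvFdivNat a.natAbs b.natAbs
    (s * (r.1 : Int), r.2)

-- Python a / t where t is the double m * 2^e  (exact: a/(m*2^e) is a ratio of two ints)
def pvFdivD (a m e : Int) : Int × Int :=
  if 0 ≤ e then pvFdiv a (m * 2 ^ e.toNat) else pvFdiv (a * 2 ^ (-e).toNat) m

-- Python comparison (double m*2^e) >= (int c): exact
def pvFge (v : Int × Int) (c : Int) : Bool :=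
  if 0 ≤ v.2 then decide (c ≤ v.1 * 2 ^ v.2.toNat) else decide (c * 2 ^ (-v.2).toNat ≤ v.1)

-- the loop condition of both Pythons: (i + 1) / parts_per_chunk >= m + 1
def pvCond (pp : Int × Int) (i m : Nat) : Bool :=
  pvFge (pvFdivD ((i : Int) + 1) pp.1 pp.2) ((m : Int) + 1)

-- ===== PORT A =====
-- the for-loop of A: state = (index i, adjusted_parts, current_parts)
def pvALoop (pp : Int × Int) : List String → Nat → List String → List String → List String
  | [], _, adjusted, current =>
      if current = [] then adjusted else adjusted ++ [PySem.Str.join "" current]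
  | p :: rest, i, adjusted, current =>
      let current' := current ++ [p]
      if pvCond pp i adjusted.length then
        pvALoop pp rest (i + 1) (adjusted ++ [PySem.Str.join "" current']) []
      else pvALoop pp rest (i + 1) adjusted current'

def adjust_translated_parts_py (translated_parts : List String) (chunk_size : Int) : List String :=
  if chunk_size < (translated_parts.length : Int) then
    let pp := pvFdiv (translated_parts.length : Int) chunk_size
    PySem.List.slice (pvALoop pp translated_parts 0 [] []) none (some chunk_size)
  else if (translated_parts.length : Int) < chunk_size then
    translated_parts ++ List.replicate (chunk_size - translated_parts.length).toNat ""
  else translated_parts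

-- ===== PORT B =====
-- the inner while of B: advance i while i < n and the condition fails
def pvBFind (pp : Int × Int) (n j i : Nat) : Nat :=
  if i < n ∧ pvCond pp i j = false then pvBFind pp n j (i + 1) else i
termination_by n - i

-- the 'for j in range(chunk_size)' loop of B, collecting cut positions (break at i >= n)
def pvBCuts (pp : Int × Int) (n : Nat) : Nat → Nat → Nat → List Nat
  | 0, _, _ => []
  | fuel + 1, j, i =>
      let i' := pvBFind pp n j i
      if n ≤ i' then [] else (i' + 1) :: pvBCuts pp n fuel (j + 1) (i' + 1)

-- joins of the slices between consecutive cuts, plus the remainder slice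
-- (translated_parts[prev:c] with 0 ≤ prev ≤ c is exactly (drop prev).take (c - prev))
def pvBOut (parts : List String) : List Nat → Nat → List String
  | [], prev => if prev < parts.length then [PySem.Str.join "" (parts.drop prev)] else []
  | c :: cs, prev => PySem.Str.join "" ((parts.drop prev).take (c - prev)) :: pvBOut parts cs c

def adjust_translated_parts_py_alt (translated_parts : List String) (chunk_size : Int) : List String :=
  let n := translated_parts.length
  if chunk_size < (n : Int) then
    let pp := pvFdiv (n : Int) chunk_size
    let cuts := pvBCuts pp n chunk_size.toNat 0 0
    PySem.List.slice (pvBOut translated_parts cuts 0) none (some chunk_size)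
  else if (n : Int) < chunk_size then
    translated_parts ++ List.replicate (chunk_size - n).toNat ""
  else translated_parts

-- ===== PRECONDITION & SPEC =====
-- Pre_ excludes only chunk_size = 0 with a nonempty list, where Python A raises ZeroDivisionError.
def Pre_adjust_translated_parts_py (translated_parts : List String) (chunk_size : Int) : Prop :=
  translated_parts = [] ∨ chunk_size ≠ 0
instance (translated_parts : List String) (chunk_size : Int) : Decidable (Pre_adjust_translated_parts_py translated_parts chunk_size) := by unfold Pre_adjust_translated_parts_py; infer_instance

def pvWitness_adjust_translated_parts_py : List String × Int := (["a", "b", "c"], 2)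

def Spec_adjust_translated_parts_py (translated_parts : List String) (chunk_size : Int) (out : List String) : Prop := out = adjust_translated_parts_py_alt translated_parts chunk_size
instance (translated_parts : List String) (chunk_size : Int) (out : List String) : Decidable (Spec_adjust_translated_parts_py translated_parts chunk_size out) := by unfold Spec_adjust_translated_parts_py; infer_instance

-- ===== CLAIM (what is proved, stated in full; the proofs are below) =====
def Claim_equal_adjust_translated_parts_py : Prop := ∀ (translated_parts : List String) (chunk_size : Int), Dom_adjust_translated_parts_py translated_parts chunk_size → Pre_adjust_translated_parts_py translated_parts chunk_size → Spec_adjust_translated_parts_py translated_parts chunk_size (adjust_translated_parts_py translated_parts chunk_size)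

-- ===== LEMMAS AND PROOFS =====

-- tail form of A's loop: only the length of 'adjusted' matters
def pvATail (pp : Int × Int) : List String → Nat → Nat → List String → List String
  | [], _, _, cur => if cur = [] then [] else [PySem.Str.join "" cur]
  | p :: rest, i, m, cur =>
      if pvCond pp i m then
        PySem.Str.join "" (cur ++ [p]) :: pvATail pp rest (i + 1) (m + 1) []
      else pvATail pp rest (i + 1) m (cur ++ [p])

theorem pvALoop_eq_tail (pp : Int × Int) :
    ∀ (ps : List String) (i : Nat) (adj cur : List String),
      pvALoop pp ps i adj cur = adj ++ pvATail pp ps i adj.length cur := by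
  intro ps
  induction ps with
  | nil => intro i adj cur; by_cases h : cur = [] <;> simp [pvALoop, pvATail, h]
  | cons p rest ih =>
    intro i adj cur
    by_cases h : pvCond pp i adj.length = true
    · simp [pvALoop, pvATail, h, ih, List.append_assoc]
    · simp at h
      simp [pvALoop, pvATail, h, ih]

theorem pvBFind_unfold (pp : Int × Int) (n j i : Nat) :
    pvBFind pp n j i = if i < n ∧ pvCond pp i j = false then pvBFind pp n j (i + 1) else i := by
  rw [pvBFind]

-- the central lemma: up to the fuel bound, B's cuts-then-slices equal A's running pass
theorem pvMain (pp : Int × Int) (parts : List String) :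
    ∀ (d i : Nat), parts.length - i = d → ∀ (fuel j i0 : Nat), i0 ≤ i → i ≤ parts.length →
      List.take fuel (pvBOut parts (pvBCuts pp parts.length fuel j i) i0)
        = List.take fuel (pvATail pp (parts.drop i) i j ((parts.drop i0).take (i - i0))) := by
  intro d
  induction d with
  | zero =>
    intro i hd fuel j i0 hi0 hin
    have hi : i = parts.length := by omega
    subst hi
    cases fuel with
    | zero => simp
    | succ f =>
      rw [pvBCuts, pvBFind_unfold]
      simp only [lt_irrefl, false_and, if_false, le_refl, if_pos]
      have hcur : (parts.drop i0).take (parts.length - i0) = parts.drop i0 := by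
        apply List.take_of_length_le; simp
      rw [hcur]
      simp only [List.drop_length, pvATail, pvBOut]
      by_cases h : i0 < parts.length
      · have : parts.drop i0 ≠ [] := by
          simp [List.drop_eq_nil_iff]; omega
        simp [h, this]
      · have : parts.drop i0 = [] := by
          simp [List.drop_eq_nil_iff]; omega
        simp [h, this]
  | succ d ih =>
    intro i hd fuel j i0 hi0 hin
    have hiln : i < parts.length := by omega
    cases fuel with
    | zero => simp
    | succ f =>
      have hdrop : parts.drop i = parts[i] :: parts.drop (i + 1) :=
        List.drop_eq_getElem_cons hiln
      have hcur : (parts.drop i0).take (i - i0) ++ [parts[i]] = (parts.drop i0).take (i + 1 - i0) := by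
        have h1 : i + 1 - i0 = (i - i0) + 1 := by omega
        rw [h1, List.take_add_one]
        have h2 : (parts.drop i0)[i - i0]? = some parts[i] := by
          rw [List.getElem?_drop]
          have : i0 + (i - i0) = i := by omega
          rw [this, List.getElem?_eq_getElem hiln]
        simp [h2]
      by_cases hc : pvCond pp i j = true
      · -- firing step
        rw [pvBCuts, pvBFind_unfold]
        simp only [hc, Bool.true_eq_false, and_false, if_false]
        have : ¬ parts.length ≤ i := by omega
        simp only [this, if_false]
        rw [hdrop]
        simp only [pvATail, hc, if_pos, pvBOut, List.take_succ_cons]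
        congr 1
        · congr 1
          have : i + 1 - i0 - (i - i0) = 1 := by omega
          rw [hcur]
        · have := ih (i + 1) (by omega) f (j + 1) (i + 1) (by omega) (by omega)
          simpa using this
      · -- non-firing step: both sides advance i by one
        have hc' : pvCond pp i j = false := by simpa using hc
        have hfind : pvBFind pp parts.length j i = pvBFind pp parts.length j (i + 1) := by
          rw [pvBFind_unfold]; simp [hiln, hc']
        have hcuts : pvBCuts pp parts.length (f + 1) j i
            = pvBCuts pp parts.length (f + 1) j (i + 1) := by
          simp only [pvBCuts, hfind]
        rw [hcuts, hdrop]
        simp only [pvATail, hc', Bool.false_eq_true, if_false, hcur]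
        exact ih (i + 1) (by omega) (f + 1) j i0 (by omega) (by omega)

-- sign facts: with a negative chunk_size the condition never fires
theorem pvFdivAt_eq_pos (A B : Nat) (e : Int) (h : 0 ≤ e) :
    pvFdivAt A B e = (A / (B * 2 ^ e.toNat), A % (B * 2 ^ e.toNat), B * 2 ^ e.toNat) := by
  rw [pvFdivAt, if_pos h]

theorem pvFdivAt_eq_neg (A B : Nat) (e : Int) (h : e < 0) :
    pvFdivAt A B e = ((A * 2 ^ (-e).toNat) / B, (A * 2 ^ (-e).toNat) % B, B) := by
  rw [pvFdivAt, if_neg (by omega)]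

-- at the initial exponent the quotient is at least 1
theorem pvFdivAt_fst_one_le (A B : Nat) (hA : 0 < A) (hB : 0 < B) :
    1 ≤ (pvFdivAt A B ((Nat.log2 A : Int) - (Nat.log2 B : Int) - 53)).1 := by
  have h1 : B < 2 ^ (Nat.log2 B + 1) := Nat.lt_log2_self
  have h2 : 2 ^ Nat.log2 A ≤ A := Nat.log2_self_le (by omega)
  by_cases he : 0 ≤ (Nat.log2 A : Int) - (Nat.log2 B : Int) - 53
  · rw [pvFdivAt_eq_pos _ _ _ he]
    have hd : (((Nat.log2 A : Int) - (Nat.log2 B : Int) - 53).toNat : Int)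
        = (Nat.log2 A : Int) - (Nat.log2 B : Int) - 53 := Int.toNat_of_nonneg he
    set d := ((Nat.log2 A : Int) - (Nat.log2 B : Int) - 53).toNat with hdd
    have hle : Nat.log2 B + 1 + d ≤ Nat.log2 A := by omega
    have hden : B * 2 ^ d ≤ A := by
      calc B * 2 ^ d ≤ (2 ^ (Nat.log2 B + 1)) * 2 ^ d :=
            Nat.mul_le_mul_right _ (le_of_lt h1)
        _ = 2 ^ (Nat.log2 B + 1 + d) := (pow_add 2 _ _).symm
        _ ≤ 2 ^ Nat.log2 A := Nat.pow_le_pow_right (by norm_num) hle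
        _ ≤ A := h2
    exact (Nat.one_le_div_iff (Nat.mul_pos hB (by positivity))).mpr hden
  · rw [pvFdivAt_eq_neg _ _ _ (by omega)]
    have ht : (((-((Nat.log2 A : Int) - (Nat.log2 B : Int) - 53)).toNat : Int))
        = 53 + (Nat.log2 B : Int) - (Nat.log2 A : Int) := by omega
    set t := (-((Nat.log2 A : Int) - (Nat.log2 B : Int) - 53)).toNat with htt
    have hle : Nat.log2 B + 1 ≤ Nat.log2 A + t := by omega
    have hnum : B ≤ A * 2 ^ t := by
      calc B ≤ 2 ^ (Nat.log2 B + 1) := le_of_lt h1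
        _ ≤ 2 ^ (Nat.log2 A + t) := Nat.pow_le_pow_right (by norm_num) hle
        _ = 2 ^ Nat.log2 A * 2 ^ t := pow_add 2 _ _
        _ ≤ A * 2 ^ t := Nat.mul_le_mul_right _ h2
    exact (Nat.one_le_div_iff hB).mpr hnum

-- after the one normalising shift, the quotient is still at least 1
theorem pvFdivAt_fst_one_le_succ (A B : Nat) (hB : 0 < B) (e : Int)
    (h : 2 ^ 53 ≤ (pvFdivAt A B e).1) : 1 ≤ (pvFdivAt A B (e + 1)).1 := by
  by_cases he : 0 ≤ e
  · rw [pvFdivAt_eq_pos _ _ _ he] at h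
    rw [pvFdivAt_eq_pos _ _ _ (by omega)]
    have hden : 0 < B * 2 ^ e.toNat := Nat.mul_pos hB (by positivity)
    have h' : 2 ^ 53 * (B * 2 ^ e.toNat) ≤ A := (Nat.le_div_iff_mul_le hden).mp h
    have he1 : (e + 1).toNat = e.toNat + 1 := by omega
    rw [he1]
    apply (Nat.one_le_div_iff (Nat.mul_pos hB (by positivity))).mpr
    have : B * 2 ^ (e.toNat + 1) = 2 * (B * 2 ^ e.toNat) := by ring
    rw [this]
    nlinarith [pow_pos (show 0 < 2 by norm_num) e.toNat, hB]
  · rw [pvFdivAt_eq_neg _ _ _ (by omega)] at h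
    have h' : 2 ^ 53 * B ≤ A * 2 ^ (-e).toNat := (Nat.le_div_iff_mul_le hB).mp h
    by_cases he1 : 0 ≤ e + 1
    · -- e = -1
      have he' : e = -1 := by omega
      rw [pvFdivAt_eq_pos _ _ _ he1]
      subst he'
      simp only [show ((-(-1) : Int)).toNat = 1 by rfl, pow_one] at h'
      simp only [show ((-1 : Int) + 1).toNat = 0 by rfl, pow_zero, Nat.mul_one]
      exact (Nat.one_le_div_iff hB).mpr (by nlinarith)
    · rw [pvFdivAt_eq_neg _ _ _ (by omega)]
      have ht : (-e).toNat = (-(e + 1)).toNat + 1 := by omega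
      have hnum : A * 2 ^ (-e).toNat = A * 2 ^ (-(e + 1)).toNat * 2 := by
        rw [ht, pow_succ, Nat.mul_assoc]
      rw [hnum] at h'
      apply (Nat.one_le_div_iff hB).mpr
      nlinarith

theorem pvFdivNat_pos (A B : Nat) (hA : 0 < A) (hB : 0 < B) : 0 < (pvFdivNat A B).1 := by
  unfold pvFdivNat
  have hbase := pvFdivAt_fst_one_le A B hA hB
  dsimp only
  by_cases h1 : 2 ^ 53 ≤ (pvFdivAt A B ((Nat.log2 A : Int) - (Nat.log2 B : Int) - 53)).1
  · have hs := pvFdivAt_fst_one_le_succ A B hB _ h1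
    split_ifs <;> omega
  · split_ifs <;> omega

theorem pvFdiv_neg (a b : Int) (ha : 0 < a) (hb : b < 0) : (pvFdiv a b).1 < 0 := by
  have hq := pvFdivNat_pos a.natAbs b.natAbs (by omega) (by omega)
  unfold pvFdiv
  rw [if_neg (by omega)]
  have hs : (decide (a < 0) ≠ decide (b < 0)) := by simp [Int.not_lt.mpr (le_of_lt ha), hb]
  dsimp only
  rw [if_pos hs]
  omega

theorem pvFdivD_neg (a m e : Int) (ha : 0 < a) (hm : m < 0) : (pvFdivD a m e).1 < 0 := by
  unfold pvFdivD
  by_cases he : 0 ≤ e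
  · rw [if_pos he]
    exact pvFdiv_neg _ _ ha (by
      have : (0 : Int) < 2 ^ e.toNat := by positivity
      exact mul_neg_of_neg_of_pos hm this)
  · rw [if_neg he]
    exact pvFdiv_neg _ _ (by
      have : (0 : Int) < 2 ^ (-e).toNat := by positivity
      positivity) hm

theorem pvFge_neg (v : Int × Int) (c : Int) (hv : v.1 < 0) (hc : 0 < c) :
    pvFge v c = false := by
  unfold pvFge
  split_ifs with h
  · have h2 : v.1 * 2 ^ v.2.toNat < 0 :=
      mul_neg_of_neg_of_pos hv (by positivity)
    simp only [decide_eq_false_iff_not]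
    omega
  · have h2 : 0 < c * 2 ^ (-v.2).toNat := by positivity
    simp only [decide_eq_false_iff_not]
    omega

theorem pvCond_false_of_neg (pp : Int × Int) (hm : pp.1 < 0) (i m : Nat) :
    pvCond pp i m = false := by
  unfold pvCond
  exact pvFge_neg _ _ (pvFdivD_neg _ _ _ (by omega) hm) (by omega)

theorem pvATail_all_false (pp : Int × Int) (h : ∀ i m, pvCond pp i m = false) :
    ∀ (ps : List String) (i j : Nat) (cur : List String),
      pvATail pp ps i j cur = if cur ++ ps = [] then [] else [PySem.Str.join "" (cur ++ ps)] := by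
  intro ps
  induction ps with
  | nil => intro i j cur; simp [pvATail]
  | cons p rest ih =>
    intro i j cur
    rw [pvATail, h, if_neg (by simp)]
    · rw [ih]
      simp
  

-- ===== VERDICT (by name: the statement is the Claim_ definition above) =====
theorem adjust_translated_parts_py_spec : Claim_equal_adjust_translated_parts_py := by
  intro parts k _hdom hpre
  unfold Spec_adjust_translated_parts_py adjust_translated_parts_py adjust_translated_parts_py_alt
  by_cases hgt : k < (parts.length : Int)
  · simp only [hgt, if_pos]
    rcases lt_trichotomy k 0 with hk | hk | hk
    · -- negative chunk size: the condition never fires; both sides are the single joined chunk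
      by_cases hnil : parts = []
      · subst hnil
        have hfuel : k.toNat = 0 := by omega
        simp [pvALoop, hfuel, pvBCuts, pvBOut]
      have hn : 0 < parts.length := List.length_pos_iff.mpr hnil
      have hpp : (pvFdiv (parts.length : Int) k).1 < 0 :=
        pvFdiv_neg _ _ (by exact_mod_cast hn) hk
      have hcond := pvCond_false_of_neg _ hpp
      congr 1
      rw [pvALoop_eq_tail, pvATail_all_false _ hcond]
      have hfuel : k.toNat = 0 := by omega
      rw [hfuel]
      simp only [pvBCuts, pvBOut, List.nil_append, List.drop_zero]
      by_cases h : parts = []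
      · simp [h]
      · have : 0 < parts.length := hn
        simp [h, this]
    · -- chunk_size = 0 is outside Pre_ when the list is nonempty
      exfalso
      rcases hpre with h | h
      · subst h; simp at hgt; omega
      · exact h hk
    · -- positive chunk size: compare the first chunk_size chunks
      rw [PySem.List.slice_to _ (le_of_lt hk), PySem.List.slice_to _ (le_of_lt hk)]
      rw [pvALoop_eq_tail]
      have := pvMain (pvFdiv (parts.length : Int) k) parts (parts.length) 0 (by omega)
        k.toNat 0 0 (by omega) (by omega)
      simpa using this.symm
  · simp only [hgt, if_false]
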